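-- pv_equiv track=rewrite | github.com/jszopi/repESP | repESP/util.py | mask_from_list
-- ===== SOURCE A (Python) =====
-- from typing import Dict, List, TypeVar, Union
--
-- T1 = TypeVar('T1')
--
-- T2 = TypeVar('T2')
--
-- def mask_from_list(  # type: ignore # (defaults with generics: https://github.com/python/mypy/issues/3737)
--     list_: List[int],
--     length: int,
--     value_if_present: T1=True,
--     value_if_absent: T2=False,
--     one_indexed: bool=False
-- ) -> List[Union[T1, T2]]:
--     """Convenience function for creating masks from lists
--
--     For sparse data or certain user input it may be easier to represent
--     properties of a list (e.g. whether each atom belongs to a methyl or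
--     methylene group) as a list of elements which have a certain value of the
--     property. However, some interfaces of this library expect complete lists
--     ('masks') and thus this convenience function is provided for the conversion.
--
--     Example
--     -------
--     >>> mask_from_list([1], 3)
--     [False, True, False]
--
--     Note that the same output can always be achieved with the `list_from_dict`
--     function.
--
--     >>> list_from_dict({1: True}, 3, False)
--     [False, True, False]
--
--     The difference is that `list_from_dict` allows more than two values in the
--     output list. When only two values are needed, `mask_from_list` has a more
--     convenient input format.
--
--     Parameters
--     ----------
--     list\_ : typing.List[int]
--         The list of indices, for which the corresponding values in the resulting
--         list are to have `value_if_present` as the value (and `value_if_absent`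
--         otherwise).
--
--         If this argument contains values outside the range of valid indices in
--         the desired list, the input is not valid; no errors will be raised
--         but these keys will be ignored.
--
--         Valid indices are integer values of `i` that fulfil ``0 <= i <
--         length`` if `one_indexed` is False and ``0 < i <= length`` otherwise.
--     length : int
--         The length of the desired list.
--     value_if_present : T1, optional
--         The value to be assigned to the element of the output list if the
--         corresponding argument is present in the `list_` argument. Defaults
--         to True.
--     value_if_absent : T2, optional
--         The value to be assigned to the element of the output list if the
--         corresponding argument is absent from the `list_` argument. Defaults
--         to False.
--     one_indexed : bool, optional
--         Whether the list indices in the keys of the input `dict_` are counting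
--         from one. Defaults to False, meaning they are counting from zero.
--
--     Returns
--     -------
--     typing.List[Union[T1, T2]]
--         A list of length `length` with values equal to `value_if_present`
--         if the corresponding item is in the input `list_` and `value_if_absent`
--         otherwise.
--     """
--     offset = 1 if one_indexed else 0
--     return [value_if_present if i+offset in list_ else value_if_absent for i in range(length)]
-- ===== SOURCE B (Python) =====
-- def mask_from_list(
--     list_,
--     length,
--     value_if_present=True,
--     value_if_absent=False,
--     one_indexed=False
-- ):
--     # Sort the normalized indices once, then merge: walk output positions in
--     # increasing order with a pointer into the sorted index list.
--     offset = 1 if one_indexed else 0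
--     idxs = sorted(x - offset for x in list_)
--     out = []
--     k = 0
--     for i in range(length):
--         while k < len(idxs) and idxs[k] < i:
--             k += 1
--         if k < len(idxs) and idxs[k] == i:
--             out.append(value_if_present)
--         else:
--             out.append(value_if_absent)
--     return out
-- ===== Notes on version B (the rewrite author's own statement) =====
-- stated objective: faster
-- what changed: B sorts the normalized indices once and then merges them against the output positions with a single advancing pointer, instead of testing membership of each output position in the unsorted list.
import Mathlib
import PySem

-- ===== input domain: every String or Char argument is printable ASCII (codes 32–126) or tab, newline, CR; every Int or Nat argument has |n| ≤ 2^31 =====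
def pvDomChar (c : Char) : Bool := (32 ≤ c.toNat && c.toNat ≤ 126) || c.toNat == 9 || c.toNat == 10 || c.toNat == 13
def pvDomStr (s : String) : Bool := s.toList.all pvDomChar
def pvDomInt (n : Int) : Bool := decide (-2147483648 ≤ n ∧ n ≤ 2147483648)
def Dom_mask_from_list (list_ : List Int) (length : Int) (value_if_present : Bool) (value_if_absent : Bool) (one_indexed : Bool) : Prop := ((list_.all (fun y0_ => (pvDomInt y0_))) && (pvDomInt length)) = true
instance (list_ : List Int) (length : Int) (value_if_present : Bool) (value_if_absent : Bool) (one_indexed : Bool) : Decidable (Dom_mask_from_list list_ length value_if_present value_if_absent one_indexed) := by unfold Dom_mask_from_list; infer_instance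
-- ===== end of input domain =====

-- B sorts the normalized indices once and merges them against the increasing output positions with an advancing pointer (objective: faster).

-- ===== PORT A =====
def mask_from_list (list_ : List Int) (length : Int) (value_if_present : Bool) (value_if_absent : Bool) (one_indexed : Bool) : List Bool :=
  let offset : Int := if one_indexed then 1 else 0
  (PySem.List.pyRange 0 length 1).map (fun i => if (i + offset) ∈ list_ then value_if_present else value_if_absent)

-- ===== PORT B =====
-- the for-loop of Source B over range(length); 'rem' is the sorted index list seen from the
-- current pointer position k onwards, the inner while-loop is the dropWhile
def mflGo (vp va : Bool) (rem : List Int) : List Int → List Bool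
  | [] => []
  | i :: is =>
    let rem' := rem.dropWhile (fun x => decide (x < i))
    (match rem' with
     | y :: _ => if y = i then vp else va
     | [] => va) :: mflGo vp va rem' is

def mask_from_list_alt (list_ : List Int) (length : Int) (value_if_present : Bool) (value_if_absent : Bool) (one_indexed : Bool) : List Bool :=
  let offset : Int := if one_indexed then 1 else 0
  let idxs := PySem.List.sorted (list_.map (fun x => x - offset)) (fun x => x) false
  mflGo value_if_present value_if_absent idxs (PySem.List.pyRange 0 length 1)

-- ===== PRECONDITION & SPEC =====
def Spec_mask_from_list (list_ : List Int) (length : Int) (value_if_present : Bool) (value_if_absent : Bool) (one_indexed : Bool) (out : List Bool) : Prop := out = mask_from_list_alt list_ length value_if_present value_if_absent one_indexed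
instance (list_ : List Int) (length : Int) (value_if_present : Bool) (value_if_absent : Bool) (one_indexed : Bool) (out : List Bool) : Decidable (Spec_mask_from_list list_ length value_if_present value_if_absent one_indexed out) := by unfold Spec_mask_from_list; infer_instance

-- ===== CLAIM (what is proved, stated in full; the proofs are below) =====
def Claim_equal_mask_from_list : Prop := ∀ (list_ : List Int) (length : Int) (value_if_present : Bool) (value_if_absent : Bool) (one_indexed : Bool), Dom_mask_from_list list_ length value_if_present value_if_absent one_indexed → Spec_mask_from_list list_ length value_if_present value_if_absent one_indexed (mask_from_list list_ length value_if_present value_if_absent one_indexed)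

-- ===== LEMMAS AND PROOFS =====

-- membership in a sorted list survives dropping the strictly-smaller prefix
theorem mem_dropWhile_lt_iff (rem : List Int) (i j : Int) (hij : i ≤ j) :
    j ∈ rem.dropWhile (fun x => decide (x < i)) ↔ j ∈ rem := by
  constructor
  · intro h; exact (rem.dropWhile_sublist _).mem h
  · intro h
    rcases (List.takeWhile_append_dropWhile (p := fun x => decide (x < i)) (l := rem)) ▸ h |> List.mem_append.mp with h' | h'
    · have := List.mem_takeWhile_imp h'
      simp at this; omega
    · exact h'

-- in a sorted remainder, position i is present iff the pointer (after skipping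
-- smaller entries) lands on an entry equal to i
theorem head_dropWhile_iff (rem : List Int) (hs : rem.Pairwise (· ≤ ·)) (i : Int) :
    (match rem.dropWhile (fun x => decide (x < i)) with
      | y :: _ => y = i
      | [] => False) ↔ i ∈ rem := by
  rw [← mem_dropWhile_lt_iff rem i i le_rfl]
  have hs' : (rem.dropWhile (fun x => decide (x < i))).Pairwise (· ≤ ·) :=
    hs.sublist (rem.dropWhile_sublist _)
  cases hrem : rem.dropWhile (fun x => decide (x < i)) with
  | nil => simp
  | cons y t =>
    have hy : ¬ (y < i) := by
      have := List.head?_dropWhile_not (fun x => decide (x < i)) rem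
      rw [hrem] at this; simpa using this
    constructor
    · intro h; simp [h]
    · intro h
      rcases List.mem_cons.mp h with h | h
      · omega
      · have := (List.pairwise_cons.mp (hrem ▸ hs')).1 i h
        omega

-- the pointer walk equals the per-position membership map, for sorted inputs
theorem mflGo_eq (vp va : Bool) (rs : List Int) : ∀ (rem : List Int),
    rem.Pairwise (· ≤ ·) → rs.Pairwise (· ≤ ·) →
    mflGo vp va rem rs = rs.map (fun i => if i ∈ rem then vp else va) := by
  induction rs with
  | nil => intro rem _ _; rfl
  | cons i is ih =>
    intro rem hrem hrs
    have hrem' : (rem.dropWhile (fun x => decide (x < i))).Pairwise (· ≤ ·) :=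
      hrem.sublist (rem.dropWhile_sublist _)
    have hle : ∀ j ∈ is, i ≤ j := (List.pairwise_cons.mp hrs).1
    simp only [mflGo, List.map_cons]
    refine congrArg₂ _ ?_ ?_
    · have hh := head_dropWhile_iff rem hrem i
      cases hd : rem.dropWhile (fun x => decide (x < i)) with
      | nil =>
        rw [hd] at hh
        simp only [iff_iff_implies_and_implies] at hh
        have : i ∉ rem := fun h => hh.2 h
        simp [this]
      | cons y t =>
        rw [hd] at hh
        by_cases hy : y = i
        · have : i ∈ rem := hh.mp hy
          simp [hy, this]
        · have : i ∉ rem := fun h => hy (hh.mpr h)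
          simp [hy, this]
    · rw [ih _ hrem' ((List.pairwise_cons.mp hrs).2)]
      apply List.map_congr_left
      intro j hj
      simp only [mem_dropWhile_lt_iff rem i j (hle j hj)]

-- ===== VERDICT (by name: the statement is the Claim_ definition above) =====
theorem mask_from_list_spec : Claim_equal_mask_from_list := by
  intro list_ L vp va oi _
  unfold Spec_mask_from_list mask_from_list mask_from_list_alt
  set offset : Int := if oi then 1 else 0 with hoff
  set idxs := PySem.List.sorted (list_.map (fun x => x - offset)) (fun x => x) false with hidxs
  have hsorted : idxs.Pairwise (· ≤ ·) := PySem.List.sorted_pairwise _ _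
  have hrange : (PySem.List.pyRange 0 L 1).Pairwise (· ≤ ·) :=
    (PySem.List.pairwise_lt_pyRange_one 0 L).imp (fun h => le_of_lt h)
  rw [mflGo_eq vp va _ idxs hsorted hrange]
  apply List.map_congr_left
  intro i _
  have hmem : i ∈ idxs ↔ (i + offset) ∈ list_ := by
    rw [hidxs, PySem.List.mem_sorted, List.mem_map]
    constructor
    · rintro ⟨x, hx, he⟩
      have : x = i + offset := by omega
      exact this ▸ hx
    · intro h; exact ⟨i + offset, h, by omega⟩
  simp only [hmem]
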